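-- pv_equiv track=rewrite | github.com/danieljohnevans/vt-elastic | combine_json.py | refactor_json_content
-- ===== SOURCE A (Python) =====
-- def refactor_json_content(contents):
--     refactored_lines = []
--
--     for idx, content in enumerate(contents):
--         lines = content.strip().split('\n')
--         refactored_lines.extend([line.strip() + ',' for line in lines[:-1]])
--
--         if idx == len(contents) - 1:
--             refactored_lines.append(lines[-1].strip())
--         else:
--             refactored_lines.append(lines[-1].strip() + ',')
--
--     refactored_content = '[' + ''.join(refactored_lines) + ']'
--     return refactored_content
-- ===== SOURCE B (Python) =====
-- def refactor_json_content(contents):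
--     out = '['
--     first = True
--     for content in contents:
--         rest = content.strip()
--         while True:
--             if first:
--                 first = False
--             else:
--                 out += ','
--             i = rest.find('\n')
--             if i < 0:
--                 out += rest.strip()
--                 break
--             out += rest[:i].strip()
--             rest = rest[i + 1:]
--     return out + ']'
-- ===== Notes on version B (the rewrite author's own statement) =====
-- stated objective: alternative
-- what changed: Instead of A's building a list of per-line pieces with boundary special cases (comma on lines[:-1] vs lines[-1], idx == len-1) and joining at the end, B never splits: it scans each block with a find('\n') cursor loop, emitting stripped segments directly into the growing output string with a first-element flag deciding each separating comma.
import Mathlib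
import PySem

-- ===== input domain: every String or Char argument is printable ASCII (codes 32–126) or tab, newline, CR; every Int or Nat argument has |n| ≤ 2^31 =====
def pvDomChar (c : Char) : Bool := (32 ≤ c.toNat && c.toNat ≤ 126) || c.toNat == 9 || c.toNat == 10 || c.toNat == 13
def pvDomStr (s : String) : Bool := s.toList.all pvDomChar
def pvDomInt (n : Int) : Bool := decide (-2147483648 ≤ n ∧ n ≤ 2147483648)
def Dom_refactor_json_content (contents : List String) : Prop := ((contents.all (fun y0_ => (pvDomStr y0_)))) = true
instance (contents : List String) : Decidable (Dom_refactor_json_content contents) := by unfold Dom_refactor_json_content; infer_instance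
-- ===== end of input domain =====

-- B replaces A's list-of-pieces with boundary special cases by a find('\n') cursor scan that
-- emits stripped segments straight into the output with a first-element flag — alternative, same cost.

-- ===== PORT A =====
-- Literal port of A; strings handled as List Char via PySem.Chars (exact on the domain).
def refactor_json_content (contents : List String) : String :=
  let refactored_lines : List (List Char) :=
    (PySem.List.enumerate contents).foldl
      (fun acc p =>
        let lines := PySem.Chars.splitOn (PySem.Chars.strip p.2.toList) ['\n']
        let acc := acc ++ (PySem.List.slice lines none (some (-1))).map
          (fun line => PySem.Chars.strip line ++ [','])
        -- lines[-1]: split('\n') is never empty, so Python never raises; getD [] is unreachable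
        if p.1 == (contents.length : Int) - 1 then
          acc ++ [PySem.Chars.strip ((PySem.List.pyGet? lines (-1)).getD [])]
        else
          acc ++ [PySem.Chars.strip ((PySem.List.pyGet? lines (-1)).getD []) ++ [',']])
      []
  String.mk ('[' :: PySem.Chars.join [] refactored_lines ++ [']'])

-- ===== PORT B =====
-- termination helper for the while loop: a found '\n' lies strictly inside rest
theorem pvFind_lt_length (rest : List Char) (h : ¬ PySem.Chars.find rest ['\n'] < 0) :
    (PySem.Chars.find rest ['\n']).toNat < rest.length := by
  have h0 : 0 ≤ PySem.Chars.find rest ['\n'] := by omega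
  have hpre := (PySem.Chars.find_spec h0).1
  have hlen := hpre.length_le
  simp only [List.length_cons, List.length_nil, List.length_drop] at hlen
  omega

-- the while-loop of B: scan rest with find('\n'), emitting stripped segments into out;
-- 'first' decides the separating comma before each emitted segment
def pvLine (out : List Char) (rest : List Char) (first : Bool) : List Char :=
  let out := if first then out else out ++ [',']
  let i := PySem.Chars.find rest ['\n']
  if h : i < 0 then out ++ PySem.Chars.strip rest
  else pvLine (out ++ PySem.Chars.strip (PySem.List.slice rest none (some i)))
        (PySem.List.slice rest (some (i + 1)) none) false
termination_by rest.length
decreasing_by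
  rw [PySem.List.slice_from _ (by have := PySem.Chars.neg_one_le_find rest ['\n']; omega)]
  have := pvFind_lt_length rest h
  simp only [List.length_drop]
  omega

-- the while loop always runs at least once, so first is false after each block
def refactor_json_content_alt (contents : List String) : String :=
  let p := contents.foldl
    (fun (p : List Char × Bool) content =>
      (pvLine p.1 (PySem.Chars.strip content.toList) p.2, false))
    (['['], true)
  String.mk (p.1 ++ [']'])

-- ===== PRECONDITION & SPEC =====
def Spec_refactor_json_content (contents : List String) (out : String) : Prop := out = refactor_json_content_alt contents
instance (contents : List String) (out : String) : Decidable (Spec_refactor_json_content contents out) := by unfold Spec_refactor_json_content; infer_instance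

-- ===== CLAIM (what is proved, stated in full; the proofs are below) =====
def Claim_equal_refactor_json_content : Prop := ∀ (contents : List String), Dom_refactor_json_content contents → Spec_refactor_json_content contents (refactor_json_content contents)

-- ===== LEMMAS AND PROOFS =====

-- the stripped lines of one content block
def pvCells (s : String) : List (List Char) :=
  (PySem.Chars.splitOn (PySem.Chars.strip s.toList) ['\n']).map PySem.Chars.strip

-- the common middle form both ports are reduced to
def pvMid (contents : List String) : String :=
  String.mk ('[' :: PySem.Chars.join [','] (contents.flatMap pvCells) ++ [']'])

-- ---- A-side reduction (A = pvMid) ----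

def pvStepA (n : Int) (acc : List (List Char)) (p : Int × String) : List (List Char) :=
  let lines := PySem.Chars.splitOn (PySem.Chars.strip p.2.toList) ['\n']
  let acc := acc ++ (PySem.List.slice lines none (some (-1))).map
    (fun line => PySem.Chars.strip line ++ [','])
  if p.1 == n - 1 then
    acc ++ [PySem.Chars.strip ((PySem.List.pyGet? lines (-1)).getD [])]
  else
    acc ++ [PySem.Chars.strip ((PySem.List.pyGet? lines (-1)).getD []) ++ [',']]

theorem pvUnfoldA (contents : List String) :
    refactor_json_content contents =
      String.mk ('[' :: PySem.Chars.join []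
        ((PySem.List.enumerate contents).foldl (pvStepA contents.length) []) ++ [']']) := rfl

theorem pvSplitOn_go_ne_nil (sep : List Char) (fuel : Nat) (l cur : List Char)
    (acc : List (List Char)) : PySem.Chars.splitOn.go sep fuel l cur acc ≠ [] := by
  induction fuel generalizing l cur acc with
  | zero => simp [PySem.Chars.splitOn.go]
  | succ fuel ih =>
    cases l with
    | nil => simp [PySem.Chars.splitOn.go]
    | cons c rest =>
      simp only [PySem.Chars.splitOn.go]
      split_ifs with h
      · exact ih _ _ _
      · exact ih _ _ _

theorem pvSplitOn_ne_nil (s sep : List Char) : PySem.Chars.splitOn s sep ≠ [] :=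
  pvSplitOn_go_ne_nil sep _ s [] []

theorem pvCells_ne_nil (s : String) : pvCells s ≠ [] := by
  unfold pvCells
  simp [pvSplitOn_ne_nil]

theorem pvStepA_of_ne (n : Int) (acc : List (List Char)) (p : Int × String)
    (h : p.1 ≠ n - 1) :
    pvStepA n acc p = acc ++ (pvCells p.2).map (· ++ [',']) := by
  unfold pvStepA
  rw [if_neg (by simpa using h)]
  set lines := PySem.Chars.splitOn (PySem.Chars.strip p.2.toList) ['\n'] with hl
  have hne : lines ≠ [] := pvSplitOn_ne_nil _ _
  rw [PySem.List.slice_to_neg_one, PySem.List.pyGet?_neg_one]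
  conv_rhs => rw [pvCells, ← hl, ← List.dropLast_append_getLast hne]
  rw [List.map_append, List.map_append, List.map_map]
  simp [List.getLast?_eq_some_getLast hne, Function.comp_def]

theorem pvStepA_of_eq (n : Int) (acc : List (List Char)) (p : Int × String)
    (h : p.1 = n - 1) :
    pvStepA n acc p = acc ++ ((pvCells p.2).dropLast.map (· ++ [','])
      ++ [(pvCells p.2).getLastD []]) := by
  unfold pvStepA
  rw [if_pos (by simpa using h)]
  set lines := PySem.Chars.splitOn (PySem.Chars.strip p.2.toList) ['\n'] with hl
  have hne : lines ≠ [] := pvSplitOn_ne_nil _ _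
  rw [PySem.List.slice_to_neg_one, PySem.List.pyGet?_neg_one]
  rw [pvCells, ← hl]
  simp [List.getLastD_eq_getLast?, List.getLast?_map, ← List.map_dropLast, List.map_map,
    List.getLast?_eq_some_getLast hne, Function.comp_def, List.append_assoc]

theorem pvFold_no_last (n : Int) (cs : List String) :
    ∀ (k : Int) (acc : List (List Char)), k + cs.length ≤ n - 1 →
    (PySem.List.enumerate cs k).foldl (pvStepA n) acc =
      acc ++ cs.flatMap (fun s => (pvCells s).map (· ++ [','])) := by
  induction cs with
  | nil => intro k acc _; simp [PySem.List.enumerate]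
  | cons a cs ih =>
    intro k acc hb
    rw [show PySem.List.enumerate (a :: cs) k = (k, a) :: PySem.List.enumerate cs (k + 1) by
      simp [PySem.List.enumerate]]
    rw [List.foldl_cons, pvStepA_of_ne n acc (k, a) (by simp at hb ⊢; omega),
      ih (k + 1) _ (by simp at hb ⊢; omega)]
    simp [List.append_assoc]

theorem pvEnumerate_append_singleton {α : Type} (xs : List α) (x : α) :
    ∀ (k : Int), PySem.List.enumerate (xs ++ [x]) k =
      PySem.List.enumerate xs k ++ [(k + xs.length, x)] := by
  induction xs with
  | nil => intro k; simp [PySem.List.enumerate]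
  | cons a t ih =>
    intro k
    rw [List.cons_append,
      show PySem.List.enumerate (a :: (t ++ [x])) k
        = (k, a) :: PySem.List.enumerate (t ++ [x]) (k + 1) by simp [PySem.List.enumerate],
      show PySem.List.enumerate (a :: t) k
        = (k, a) :: PySem.List.enumerate t (k + 1) by simp [PySem.List.enumerate],
      ih (k + 1)]
    simp
    ring_nf

theorem pvJoin_nil_eq_flatten (xs : List (List Char)) :
    PySem.Chars.join [] xs = xs.flatten := by
  induction xs with
  | nil => simp [PySem.Chars.join_nil]
  | cons p t ih =>
    cases t with
    | nil => simp [PySem.Chars.join_singleton]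
    | cons q r => rw [PySem.Chars.join_cons_cons, ih]; simp

theorem pvJoin_comma_append (xs d : List (List Char)) (hd : d ≠ []) :
    PySem.Chars.join [','] (xs ++ d) =
      (xs.map (· ++ [','])).flatten ++ PySem.Chars.join [','] d := by
  induction xs with
  | nil => simp
  | cons p t ih =>
    have hne : t ++ d ≠ [] := by simp [hd]
    obtain ⟨q, r, hqr⟩ := List.exists_cons_of_ne_nil hne
    rw [List.cons_append, hqr, PySem.Chars.join_cons_cons, ← hqr, ih]
    simp [List.append_assoc]

theorem pvJoin_comma_last (d : List (List Char)) (hd : d ≠ []) :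
    PySem.Chars.join [','] d =
      (d.dropLast.map (· ++ [','])).flatten ++ d.getLastD [] := by
  induction d with
  | nil => exact absurd rfl hd
  | cons p t ih =>
    cases t with
    | nil => simp [PySem.Chars.join_singleton]
    | cons q r =>
      rw [PySem.Chars.join_cons_cons, ih (by simp)]
      simp [List.append_assoc]

theorem pvA_eq_mid (contents : List String) :
    refactor_json_content contents = pvMid contents := by
  rcases contents.eq_nil_or_concat' with rfl | ⟨cs, c, rfl⟩
  · rfl
  · rw [pvUnfoldA, pvMid]
    rw [pvEnumerate_append_singleton cs c 0, List.foldl_append,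
      pvFold_no_last _ cs 0 [] (by simp), List.foldl_cons, List.foldl_nil,
      pvStepA_of_eq _ _ (0 + (cs.length : Int), c) (by simp)]
    rw [List.nil_append, pvJoin_nil_eq_flatten]
    rw [List.flatMap_append, pvJoin_comma_append _ _ (by simpa using pvCells_ne_nil c)]
    simp only [List.flatMap_cons, List.flatMap_nil, List.append_nil]
    rw [pvJoin_comma_last _ (pvCells_ne_nil c), List.map_flatMap]
    simp [List.append_assoc, List.flatten_append]

-- ---- B-side reduction (B = pvMid) ----

theorem pvHeadI_tail {α : Type} [Inhabited α] (l : List α) (h : l ≠ []) : l.headI :: l.tail = l := by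
  cases l with
  | nil => exact absurd rfl h
  | cons a t => rfl

-- a simple structural single-'\n' split, the reference shape for both splitOn and pvLine
def pvSplit1 : List Char → List (List Char)
  | [] => [[]]
  | c :: rest =>
    let s := pvSplit1 rest
    if c = '\n' then [] :: s else (c :: s.headI) :: s.tail

theorem pvSplit1_ne_nil (t : List Char) : pvSplit1 t ≠ [] := by
  cases t with
  | nil => simp [pvSplit1]
  | cons c rest => simp only [pvSplit1]; split_ifs <;> simp

theorem pvGo_single (fuel : Nat) :
    ∀ (l cur : List Char) (acc : List (List Char)), l.length < fuel →
    PySem.Chars.splitOn.go ['\n'] fuel l cur acc =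
      acc.reverse ++ (cur.reverse ++ (pvSplit1 l).headI) :: (pvSplit1 l).tail := by
  induction fuel with
  | zero => intro l cur acc h; omega
  | succ fuel ih =>
    intro l cur acc h
    cases l with
    | nil => simp [PySem.Chars.splitOn.go, pvSplit1]
    | cons c rest =>
      simp only [PySem.Chars.splitOn.go]
      by_cases hc : c = '\n'
      · rw [if_pos (by simp [hc, List.isPrefixOf])]
        rw [show List.drop (['\n'] : List Char).length (c :: rest) = rest by simp]
        rw [ih rest [] (cur.reverse :: acc) (by simp at h; omega)]
        have hne := pvSplit1_ne_nil rest
        simp [pvSplit1, hc]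
        rw [pvHeadI_tail _ hne]
      · rw [if_neg (by simp [List.isPrefixOf]; intro hh; exact absurd hh.symm hc)]
        rw [ih rest (c :: cur) acc (by simp at h; omega)]
        simp [pvSplit1, hc, List.append_assoc]

theorem pvSplitOn_eq_split1 (t : List Char) :
    PySem.Chars.splitOn t ['\n'] = pvSplit1 t := by
  show PySem.Chars.splitOn.go ['\n'] (t.length + 1) t [] [] = _
  rw [pvGo_single (t.length + 1) t [] [] (by omega)]
  simpa using pvHeadI_tail _ (pvSplit1_ne_nil t)

theorem pvSplit1_no_nl (t : List Char) (h : '\n' ∉ t) : pvSplit1 t = [t] := by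
  induction t with
  | nil => rfl
  | cons c rest ih =>
    simp only [List.mem_cons, not_or] at h
    have hc : ¬ c = '\n' := fun hh => h.1 hh.symm
    simp [pvSplit1, hc, ih h.2]

theorem pvSplit1_append (a b : List Char) (h : '\n' ∉ a) :
    pvSplit1 (a ++ '\n' :: b) = a :: pvSplit1 b := by
  induction a with
  | nil => simp [pvSplit1]
  | cons c rest ih =>
    simp only [List.mem_cons, not_or] at h
    rw [List.cons_append]
    have hc : ¬ c = '\n' := fun hh => h.1 hh.symm
    simp [pvSplit1, hc, ih h.2]

-- find < 0 means no '\n' at all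
theorem pvFind_neg_not_mem (t : List Char) (h : PySem.Chars.find t ['\n'] < 0) :
    '\n' ∉ t := by
  intro hm
  have hin : ['\n'] <:+: t := by
    obtain ⟨s, u, rfl⟩ := List.append_of_mem hm
    exact ⟨s, u, by simp⟩
  have := (PySem.Chars.find_nonneg_iff t ['\n']).2 hin
  omega

-- a nonnegative find decomposes t around its FIRST '\n'
theorem pvFind_decomp (t : List Char) (h : ¬ PySem.Chars.find t ['\n'] < 0) :
    t = t.take (PySem.Chars.find t ['\n']).toNat ++
        '\n' :: t.drop ((PySem.Chars.find t ['\n']).toNat + 1) ∧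
      '\n' ∉ t.take (PySem.Chars.find t ['\n']).toNat := by
  have h0 : 0 ≤ PySem.Chars.find t ['\n'] := by omega
  obtain ⟨hpre, hmin⟩ := PySem.Chars.find_spec h0
  set i := (PySem.Chars.find t ['\n']).toNat with hi
  have hlt : i < t.length := pvFind_lt_length t h
  obtain ⟨u, hu⟩ := hpre
  constructor
  · have hdrop : t.drop i = '\n' :: u := by simpa using hu.symm
    have : t.drop (i + 1) = u := by
      have := congrArg (List.drop 1) hdrop
      simpa [List.drop_drop, Nat.add_comm] using this
    rw [this, ← hdrop, List.take_append_drop]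
  · intro hm
    obtain ⟨j, hj, hjc⟩ := List.getElem_of_mem hm
    have hjlen : j < i := by
      have := hj
      simp [List.length_take] at this
      omega
    apply hmin j hjlen
    have : t.drop j = t[j] :: t.drop (j + 1) := by
      rw [List.getElem_cons_drop]
    rw [this]
    have : t[j] = '\n' := by
      rw [← hjc]
      simp [List.getElem_take]
    simp [this]

theorem pvLine_eq (n : Nat) : ∀ (rest : List Char), rest.length ≤ n →
    ∀ (out : List Char) (first : Bool),
    pvLine out rest first = (if first then out else out ++ [',']) ++
      PySem.Chars.join [','] ((pvSplit1 rest).map PySem.Chars.strip) := by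
  induction n with
  | zero =>
    intro rest hr out first
    have : rest = [] := List.eq_nil_of_length_eq_zero (by omega)
    subst this
    rw [pvLine]
    simp [pvSplit1, PySem.Chars.join_singleton, PySem.Chars.find, PySem.Chars.find.go]
  | succ n ih =>
    intro rest hr out first
    rw [pvLine]
    by_cases h : PySem.Chars.find rest ['\n'] < 0
    · rw [dif_pos h]
      rw [pvSplit1_no_nl rest (pvFind_neg_not_mem rest h)]
      simp [PySem.Chars.join_singleton]
    · rw [dif_neg h]
      have h0 : 0 ≤ PySem.Chars.find rest ['\n'] := by omega
      obtain ⟨hdec, hnm⟩ := pvFind_decomp rest h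
      set i := (PySem.Chars.find rest ['\n']).toNat with hi
      have hlt : i < rest.length := pvFind_lt_length rest h
      have hslice_to : PySem.List.slice rest none (some (PySem.Chars.find rest ['\n'])) =
          rest.take i := by rw [PySem.List.slice_to _ h0]
      have hslice_from : PySem.List.slice rest (some (PySem.Chars.find rest ['\n'] + 1)) none =
          rest.drop (i + 1) := by
        rw [PySem.List.slice_from _ (by omega)]
        congr 1
        omega
      rw [hslice_to, hslice_from]
      rw [ih (rest.drop (i + 1)) (by simp; omega) _ false]
      have hsplit : pvSplit1 rest = rest.take i :: pvSplit1 (rest.drop (i + 1)) := by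
        conv_lhs => rw [hdec]
        exact pvSplit1_append _ _ hnm
      rw [hsplit]
      obtain ⟨q, r, hqr⟩ := List.exists_cons_of_ne_nil (pvSplit1_ne_nil (rest.drop (i + 1)))
      rw [hqr]
      simp only [List.map_cons, PySem.Chars.join_cons_cons]
      simp [List.append_assoc]

-- separator-join splits across a nonempty/nonempty append
theorem pvJoin_comma_sep_append (xs ys : List (List Char)) (hx : xs ≠ []) (hy : ys ≠ []) :
    PySem.Chars.join [','] (xs ++ ys) =
      PySem.Chars.join [','] xs ++ ',' :: PySem.Chars.join [','] ys := by
  induction xs with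
  | nil => exact absurd rfl hx
  | cons p t ih =>
    cases t with
    | nil =>
      obtain ⟨q, r, rfl⟩ := List.exists_cons_of_ne_nil hy
      rw [List.singleton_append, PySem.Chars.join_cons_cons, PySem.Chars.join_singleton]
      simp
    | cons p' t' =>
      have h1 : PySem.Chars.join [','] ((p :: p' :: t') ++ ys)
          = p ++ [','] ++ PySem.Chars.join [','] ((p' :: t') ++ ys) := by
        simp only [List.cons_append]
        rw [PySem.Chars.join_cons_cons]
      rw [h1, ih (by simp), PySem.Chars.join_cons_cons]
      simp [List.append_assoc]

theorem pvFlatMap_cells_ne_nil (cs : List String) (h : cs ≠ []) :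
    cs.flatMap pvCells ≠ [] := by
  obtain ⟨c, cs', rfl⟩ := List.exists_cons_of_ne_nil h
  simp only [List.flatMap_cons]
  intro hcon
  exact pvCells_ne_nil c (List.append_eq_nil_iff.1 hcon).1

-- pvLine applied to a stripped block yields the comma-join of its cells
theorem pvLine_cells (out : List Char) (c : String) (first : Bool) :
    pvLine out (PySem.Chars.strip c.toList) first =
      (if first then out else out ++ [',']) ++ PySem.Chars.join [','] (pvCells c) := by
  rw [pvLine_eq (PySem.Chars.strip c.toList).length _ le_rfl, pvCells,
    pvSplitOn_eq_split1]

-- the fold over the remaining blocks, with first already false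
theorem pvFoldB (cs : List String) : ∀ (out : List Char), cs ≠ [] →
    (cs.foldl (fun (p : List Char × Bool) content =>
        (pvLine p.1 (PySem.Chars.strip content.toList) p.2, false)) (out, false)).1 =
      out ++ ',' :: PySem.Chars.join [','] (cs.flatMap pvCells) := by
  induction cs with
  | nil => intro out h; exact absurd rfl h
  | cons c cs ih =>
    intro out _
    rw [List.foldl_cons, pvLine_cells out c false]
    by_cases hcs : cs = []
    · subst hcs
      simp [List.append_assoc]
    · rw [ih _ hcs, List.flatMap_cons,
        pvJoin_comma_sep_append _ _ (pvCells_ne_nil c) (pvFlatMap_cells_ne_nil cs hcs)]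
      simp [List.append_assoc]

theorem pvB_eq_mid (contents : List String) :
    refactor_json_content_alt contents = pvMid contents := by
  cases contents with
  | nil => rfl
  | cons c cs =>
    rw [refactor_json_content_alt, pvMid]
    simp only [List.foldl_cons]
    rw [pvLine_cells ['['] c true, if_pos rfl]
    by_cases hcs : cs = []
    · subst hcs
      simp
    · rw [pvFoldB cs _ hcs, List.flatMap_cons,
        pvJoin_comma_sep_append _ _ (pvCells_ne_nil c) (pvFlatMap_cells_ne_nil cs hcs)]
      simp [List.append_assoc]

-- ===== VERDICT (by name: the statement is the Claim_ definition above) =====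
theorem refactor_json_content_spec : Claim_equal_refactor_json_content := by
  intro contents _
  unfold Spec_refactor_json_content
  rw [pvA_eq_mid, pvB_eq_mid]
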